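-- pv_equiv track=rewrite | github.com/ktgogineni08-hub/automated_trading | trading-system/trading-system/trading-system/fno/indices.py | _extract_index_name
-- ===== SOURCE A (Python) =====
-- from typing import Dict, List, Optional, Tuple
--
-- def _extract_index_name(trading_symbol: str) -> Optional[str]:
--     """Extract index name from futures trading symbol - supports ALL exchanges"""
--     import re  # Local import ensures availability during dynamic discovery
--     # List of indices that commonly have F&O contracts (realistic list)
--     known_indices = [
--         # NSE Major Indices (Confirmed F&O availability)
--         'NIFTY', 'BANKNIFTY', 'FINNIFTY', 'MIDCPNIFTY',
--
--         # NSE Sectoral Indices (Limited F&O availability)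
--         'NIFTYIT', 'NIFTYPHARMA', 'NIFTYAUTO', 'NIFTYFMCG', 'NIFTYMETAL',
--
--         # BSE Indices (Limited availability, depends on broker)
--         'SENSEX', 'BANKEX',
--
--         # MCX Commodities (if MCX F&O access available)
--         'CRUDEOIL', 'NATURALGAS', 'GOLD', 'SILVER', 'COPPER', 'ZINC',
--
--         # Currency (CDS - if available)
--         'USDINR', 'EURINR', 'GBPINR',
--
--         # Others (rare F&O availability)
--         'INDIAVIX'
--     ]
--
--     # Sort by length (longest first) to match more specific indices first
--     for index in sorted(known_indices, key=len, reverse=True):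
--         if trading_symbol.upper().startswith(index.upper()):
--             return index
--
--     # If no direct match, extract alphabetic prefix manually
--     upper_symbol = trading_symbol.upper()
--     prefix_chars = []
--     for ch in upper_symbol:
--         if ch.isalpha():
--             prefix_chars.append(ch)
--         else:
--             break
--
--     potential_index = ''.join(prefix_chars)
--     if len(potential_index) >= 4 and potential_index.isalpha():
--         return potential_index
--
--     return None
-- ===== SOURCE B (Python) =====
-- _KNOWN_INDICES = {
--     'NIFTY', 'BANKNIFTY', 'FINNIFTY', 'MIDCPNIFTY',
--     'NIFTYIT', 'NIFTYPHARMA', 'NIFTYAUTO', 'NIFTYFMCG', 'NIFTYMETAL',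
--     'SENSEX', 'BANKEX',
--     'CRUDEOIL', 'NATURALGAS', 'GOLD', 'SILVER', 'COPPER', 'ZINC',
--     'USDINR', 'EURINR', 'GBPINR',
--     'INDIAVIX'
-- }
-- _MAX_KNOWN_LEN = max(map(len, _KNOWN_INDICES))
--
-- def _extract_index_name(trading_symbol):
--     """Extract index name from futures trading symbol - supports ALL exchanges"""
--     u = trading_symbol.upper()
--     # Probe decreasing prefixes of the symbol against the hash set of known indices;
--     # the first (longest) prefix found in the set is the answer.
--     for j in range(min(len(u), _MAX_KNOWN_LEN), 0, -1):
--         if u[:j] in _KNOWN_INDICES: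
--             return u[:j]
--     # No known index: cut at the first non-alphabetic character.
--     n = next((k for k, ch in enumerate(u) if not ch.isalpha()), len(u))
--     return u[:n] if n >= 4 else None
-- ===== Notes on version B (the rewrite author's own statement) =====
-- stated objective: alternative
-- what changed: B inverts the lookup: instead of sorting the known-index list and scanning it for a startswith match, it probes the symbol's decreasing prefixes u[:j] against a hash set of known indices (first hit is the longest match), and finds the fallback cut point as the first non-alphabetic position via next(enumerate(...)) instead of accumulating characters.
import Mathlib
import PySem

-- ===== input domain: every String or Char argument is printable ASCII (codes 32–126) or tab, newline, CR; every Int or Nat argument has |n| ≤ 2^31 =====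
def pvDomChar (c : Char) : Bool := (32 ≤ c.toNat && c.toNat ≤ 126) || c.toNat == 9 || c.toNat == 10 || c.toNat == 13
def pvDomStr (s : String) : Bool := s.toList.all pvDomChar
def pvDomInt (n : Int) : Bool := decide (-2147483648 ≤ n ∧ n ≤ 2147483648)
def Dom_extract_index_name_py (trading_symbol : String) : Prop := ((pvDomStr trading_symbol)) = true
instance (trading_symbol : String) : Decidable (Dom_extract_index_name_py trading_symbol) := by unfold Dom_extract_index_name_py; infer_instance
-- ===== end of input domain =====

-- B replaces A's scan over the sorted index list by the reverse lookup: it probes the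
-- symbol's decreasing prefixes against a hash SET of known indices (longest prefix found
-- wins), and cuts the fallback at the first non-alphabetic position (alternative
-- decomposition; same results).


-- ===== PORT A =====
-- A's known_indices list literal
def pvKnownIndices : List String :=
  ["NIFTY", "BANKNIFTY", "FINNIFTY", "MIDCPNIFTY",
   "NIFTYIT", "NIFTYPHARMA", "NIFTYAUTO", "NIFTYFMCG", "NIFTYMETAL",
   "SENSEX", "BANKEX",
   "CRUDEOIL", "NATURALGAS", "GOLD", "SILVER", "COPPER", "ZINC",
   "USDINR", "EURINR", "GBPINR",
   "INDIAVIX"]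

-- A's manual accumulation loop: 'for ch in upper_symbol: if ch.isalpha(): append else break'
def pvPrefixCharsA : List Char → List Char
  | [] => []
  | c :: cs => if PySem.Chars.isalpha c then c :: pvPrefixCharsA cs else []

def extract_index_name_py (trading_symbol : String) : Option String :=
  -- 'for index in sorted(known_indices, key=len, reverse=True): if …: return index'
  match (PySem.List.sorted pvKnownIndices (fun s => PySem.Str.len s) true).find?
      (fun index => PySem.Str.startswith (PySem.Str.upper trading_symbol) (PySem.Str.upper index)) with
  | some index => some index
  | none =>
    let upper_symbol := PySem.Str.upper trading_symbol
    -- ''.join(prefix_chars) of the accumulated characters, exact as String.ofList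
    let potential_index := String.ofList (pvPrefixCharsA upper_symbol.toList)
    if 4 ≤ PySem.Str.len potential_index ∧ PySem.Str.strIsalpha potential_index = true then
      some potential_index
    else none

-- ===== PORT B =====
-- B's module-level set literal _KNOWN_INDICES (same member strings)
def pvKnownSet : PySem.Set String :=
  PySem.Set.ofList pvKnownIndices

-- B's _MAX_KNOWN_LEN = max(map(len, _KNOWN_INDICES)) (the set is non-empty, so Python's
-- default-less max returns; ported as maxD with identity key)
def pvMaxKnownLen : Int :=
  PySem.List.maxD (pvKnownSet.map (fun s => PySem.Str.len s)) (fun x => x) 0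

def extract_index_name_py_alt (trading_symbol : String) : Option String :=
  let u := PySem.Str.upper trading_symbol
  -- 'for j in range(min(len(u), _MAX_KNOWN_LEN), 0, -1): if u[:j] in _KNOWN_INDICES: return u[:j]'
  match (PySem.List.pyRange (min (PySem.Str.len u) pvMaxKnownLen) 0 (-1)).find?
      (fun j => PySem.Set.contains pvKnownSet (PySem.Str.slice u none (some j))) with
  | some j => some (PySem.Str.slice u none (some j))
  | none =>
    -- 'n = next((k for k, ch in enumerate(u) if not ch.isalpha()), len(u))'
    let n : Int :=
      match (PySem.List.enumerate u.toList 0).find? (fun p : Int × Char => !(PySem.Chars.isalpha p.2)) with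
      | some p => p.1
      | none => PySem.Str.len u
    if (4 : Int) ≤ n then some (PySem.Str.slice u none (some n)) else none

-- ===== PRECONDITION & SPEC =====
def Spec_extract_index_name_py (trading_symbol : String) (out : Option String) : Prop := out = extract_index_name_py_alt trading_symbol
instance (trading_symbol : String) (out : Option String) : Decidable (Spec_extract_index_name_py trading_symbol out) := by unfold Spec_extract_index_name_py; infer_instance

-- ===== CLAIM (what is proved, stated in full; the proofs are below) =====
def Claim_equal_extract_index_name_py : Prop := ∀ (trading_symbol : String), Dom_extract_index_name_py trading_symbol → Spec_extract_index_name_py trading_symbol (extract_index_name_py trading_symbol)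

-- ===== LEMMAS AND PROOFS =====

-- the sorted literal of A's loop, as a plain list
def pvSortedIndices : List String :=
  ["NIFTYPHARMA", "MIDCPNIFTY", "NIFTYMETAL", "NATURALGAS", "BANKNIFTY", "NIFTYAUTO",
   "NIFTYFMCG", "FINNIFTY", "CRUDEOIL", "INDIAVIX", "NIFTYIT", "SENSEX", "BANKEX",
   "SILVER", "COPPER", "USDINR", "EURINR", "GBPINR", "NIFTY", "GOLD", "ZINC"]

theorem pvSorted_eq :
    PySem.List.sorted pvKnownIndices (fun s => PySem.Str.len s) true = pvSortedIndices := by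
  decide

theorem pvSet_eq : pvKnownSet = pvKnownIndices := by decide

theorem pvMaxLen_eq : pvMaxKnownLen = 11 := by decide

theorem pvPerm : pvSortedIndices.Perm pvKnownIndices := by decide

theorem pvUpperFixed : ∀ x ∈ pvSortedIndices, PySem.Str.upper x = x := by decide

theorem pvLenBounds : ∀ x ∈ pvKnownIndices, 4 ≤ x.toList.length ∧ x.toList.length ≤ 11 := by
  decide

theorem pvFindCongr {α : Type} (f g : α → Bool) :
    ∀ l : List α, (∀ x ∈ l, f x = g x) → l.find? f = l.find? g := by
  intro l h
  induction l with
  | nil => rfl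
  | cons a t ih =>
    simp only [List.find?]
    rw [h a (by simp)]
    cases g a with
    | true => rfl
    | false => exact ih (fun x hx => h x (by simp [hx]))

-- u[:j] for a Nat-valued j is the take of the first j characters
theorem pvSlice_take (u : String) (j : Nat) :
    PySem.Str.slice u none (some (j : Int)) = String.ofList (u.toList.take j) := by
  rw [← String.toList_inj, PySem.Str.toList_slice, PySem.Chars.slice_eq_listSlice,
    PySem.List.slice_to_natCast, String.toList_ofList]

-- 'take j known' means exactly 'a known index of length j starts the symbol' (1 ≤ j ≤ len)
theorem pvTakeKnown_iff (u : String) (j : Nat) (hj : j ≤ u.toList.length) :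
    String.ofList (u.toList.take j) ∈ pvKnownIndices ↔
      ∃ m ∈ pvKnownIndices, PySem.Str.startswith u m = true ∧ m.toList.length = j := by
  constructor
  · intro h
    refine ⟨String.ofList (u.toList.take j), h, ?_, ?_⟩
    · simp only [PySem.Str.startswith_eq, PySem.Chars.startswith_iff, String.toList_ofList]
      exact List.take_prefix j u.toList
    · simp only [String.toList_ofList, List.length_take]
      omega
  · rintro ⟨m, hm, hpm, hlen⟩
    have hpre : m.toList <+: u.toList := by
      simpa [PySem.Chars.startswith_iff] using hpm
    have : m.toList = u.toList.take j := by
      rw [← hlen]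
      exact List.prefix_iff_eq_take.mp hpre
    rwa [← this, String.ofList_toList]

-- find? on the countdown range(N, 0, -1): no hit
theorem pvDescNone (p : Int → Bool) :
    ∀ N : Nat, (∀ j : Nat, 1 ≤ j → j ≤ N → p j = false) →
      (PySem.List.pyRange (N : Int) 0 (-1)).find? p = none := by
  intro N
  induction N with
  | zero => intro _; rw [PySem.List.pyRange_neg_one_eq_nil (by omega)]; rfl
  | succ N ih =>
    intro h
    rw [PySem.List.pyRange_neg_one_cons (by exact_mod_cast Nat.succ_pos N)]
    rw [List.find?_cons_of_neg (by simpa using h (N+1) (by omega) (le_refl _))]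
    have : ((N + 1 : Nat) : Int) - 1 = (N : Int) := by push_cast; ring
    rw [this]
    exact ih (fun j h1 h2 => h j h1 (by omega))

-- find? on the countdown range(N, 0, -1): first (largest) hit
theorem pvDescSome (p : Int → Bool) (j : Nat) (hj1 : 1 ≤ j) :
    ∀ N : Nat, j ≤ N → p j = true → (∀ k : Nat, j < k → k ≤ N → p k = false) →
      (PySem.List.pyRange (N : Int) 0 (-1)).find? p = some (j : Int) := by
  intro N
  induction N with
  | zero => omega
  | succ N ih =>
    intro hjN hpj habove
    rw [PySem.List.pyRange_neg_one_cons (by exact_mod_cast Nat.succ_pos N)]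
    have hcast : ((N + 1 : Nat) : Int) - 1 = (N : Int) := by push_cast; ring
    by_cases hje : j = N + 1
    · subst hje
      rw [List.find?_cons_of_pos (by exact_mod_cast hpj)]
    · rw [List.find?_cons_of_neg
        (by simpa using habove (N+1) (by omega) (le_refl _)), hcast]
      exact ih (by omega) hpj (fun k hk1 hk2 => habove k hk1 (by omega))

theorem pvPrefixChars_all (cs : List Char)
    (h : ∀ c ∈ cs, PySem.Chars.isalpha c = true) : pvPrefixCharsA cs = cs := by
  induction cs with
  | nil => rfl
  | cons c cs ih =>
    rw [pvPrefixCharsA, if_pos (h c (by simp)), ih (fun d hd => h d (by simp [hd]))]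

-- B's 'next(…)' over enumerate computes the length of the leading alphabetic run
theorem pvNext_eq :
    ∀ (L : List Char) (s : Int),
      (match (PySem.List.enumerate L s).find? (fun p => !(PySem.Chars.isalpha p.2)) with
       | some p => p.1
       | none => s + (L.length : Int)) = s + ((pvPrefixCharsA L).length : Int) := by
  intro L
  induction L with
  | nil => intro s; simp [PySem.List.enumerate, pvPrefixCharsA]
  | cons c cs ih =>
    intro s
    rw [PySem.List.enumerate_cons]
    by_cases hc : PySem.Chars.isalpha c = true
    · rw [List.find?_cons_of_neg (by simp [hc])]
      have ihs := ih (s + 1)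
      cases hf : (PySem.List.enumerate cs (s + 1)).find? (fun p => !(PySem.Chars.isalpha p.2)) with
      | some p =>
        have ihs' : p.1 = (s + 1) + ((pvPrefixCharsA cs).length : Int) := by
          rw [hf] at ihs; simpa using ihs
        simp only [pvPrefixCharsA, if_pos hc, List.length_cons]
        push_cast
        omega
      | none =>
        have hall : ∀ c' ∈ cs, PySem.Chars.isalpha c' = true := by
          intro c' hc'
          rw [← PySem.List.map_snd_enumerate cs (s + 1)] at hc'
          obtain ⟨p, hp, hpe⟩ := List.mem_map.mp hc'
          have := List.find?_eq_none.mp hf p hp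
          rw [hpe] at this
          simpa using this
        simp [pvPrefixCharsA, if_pos hc, pvPrefixChars_all cs hall]
    · rw [List.find?_cons_of_pos (by simp [hc])]
      simp [pvPrefixCharsA, hc]

theorem pvPrefixChars_prefix (cs : List Char) : pvPrefixCharsA cs <+: cs := by
  induction cs with
  | nil => simp [pvPrefixCharsA]
  | cons c cs ih =>
    by_cases h : PySem.Chars.isalpha c = true
    · simpa [pvPrefixCharsA, h] using ih
    · simp [pvPrefixCharsA, h]

theorem pvPrefixChars_alpha (cs : List Char) :
    ∀ c ∈ pvPrefixCharsA cs, PySem.Chars.isalpha c = true := by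
  induction cs with
  | nil => simp [pvPrefixCharsA]
  | cons c cs ih =>
    by_cases h : PySem.Chars.isalpha c = true
    · simp only [pvPrefixCharsA, if_pos h]
      intro d hd
      rcases List.mem_cons.mp hd with rfl | hd'
      · exact h
      · exact ih d hd'
    · simp [pvPrefixCharsA, h]

-- ===== VERDICT (by name: the statement is the Claim_ definition above) =====
theorem extract_index_name_py_spec : Claim_equal_extract_index_name_py := by
  intro trading_symbol _
  unfold Spec_extract_index_name_py extract_index_name_py extract_index_name_py_alt
  set u := PySem.Str.upper trading_symbol with hu
  -- A's predicate, with upper on the (all-uppercase) indices removed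
  have hcong : (PySem.List.sorted pvKnownIndices (fun s => PySem.Str.len s) true).find?
      (fun index => PySem.Str.startswith u (PySem.Str.upper index))
      = pvSortedIndices.find? (fun x => PySem.Str.startswith u x) := by
    rw [pvSorted_eq]
    exact pvFindCongr _ _ _ (fun x hx => by rw [pvUpperFixed x hx])
  rw [hcong]
  -- abbreviations for B's loop bound and predicate
  set N : Nat := min u.toList.length 11 with hN
  have hbound : min (PySem.Str.len u) pvMaxKnownLen = (N : Int) := by
    rw [pvMaxLen_eq, PySem.Str.len_eq, hN]
    push_cast
    omega
  simp only [hbound]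
  have hpredB : ∀ j : Nat,
      (PySem.Set.contains pvKnownSet (PySem.Str.slice u none (some (j : Int))) = true) ↔
        String.ofList (u.toList.take j) ∈ pvKnownIndices := by
    intro j
    rw [pvSlice_take, pvSet_eq]
    simp [PySem.Set.contains]
  cases hfa : pvSortedIndices.find? (fun x => PySem.Str.startswith u x) with
  | some m =>
    -- A found m: the longest known index starting u
    rcases List.find?_eq_some_iff_append.mp hfa with ⟨hpm, as, bs, hsplit, hbefore⟩
    have hmem : m ∈ pvKnownIndices := pvPerm.mem_iff.mp (by rw [hsplit]; simp)
    have hpre : m.toList <+: u.toList := by simpa [PySem.Chars.startswith_iff] using hpm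
    have hlb := pvLenBounds m hmem
    have hle : m.toList.length ≤ u.toList.length := hpre.length_le
    -- maximality: no longer known index starts u
    have hmax : ∀ x ∈ pvKnownIndices, PySem.Str.startswith u x = true →
        x.toList.length ≤ m.toList.length := by
      intro x hx hpx
      by_contra hgt
      push Not at hgt
      have hxs : x ∈ pvSortedIndices := pvPerm.mem_iff.mpr hx
      rw [hsplit] at hxs
      rcases List.mem_append.mp hxs with hxa | hxb
      · have hb := hbefore x hxa
        rw [hpx] at hb
        simp at hb
      · rcases List.mem_cons.mp hxb with rfl | hxbs
        · omega
        · -- x after m in the length-descending sorted list: len x ≤ len m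
          have hpair := pvSorted_eq ▸
            PySem.List.sorted_pairwise_rev pvKnownIndices (fun s => PySem.Str.len s)
          rw [hsplit] at hpair
          have := (List.pairwise_append.mp hpair).2.1
          have h2 := (List.pairwise_cons.mp this).1 x hxbs
          simp only [PySem.Str.len_eq] at h2
          omega
    -- B's countdown finds exactly j = len m
    have hBfind : (PySem.List.pyRange (N : Int) 0 (-1)).find?
        (fun j => PySem.Set.contains pvKnownSet (PySem.Str.slice u none (some j)))
        = some ((m.toList.length : Nat) : Int) := by
      apply pvDescSome _ _ (by omega)
      · omega
      · exact (hpredB m.toList.length).mpr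
          (by rw [← List.prefix_iff_eq_take.mp hpre, String.ofList_toList]; exact hmem)
      · intro k hk1 hk2
        have hne : PySem.Set.contains pvKnownSet
            (PySem.Str.slice u none (some (k : Int))) = false := by
          rw [Bool.eq_false_iff]
          intro hck
          rcases (pvTakeKnown_iff u k (by omega)).mp ((hpredB k).mp hck) with ⟨x, hx, hpx, hlx⟩
          have := hmax x hx hpx
          omega
        exact hne
    simp only [hBfind]
    -- and B returns the same string
    rw [pvSlice_take, ← List.prefix_iff_eq_take.mp hpre, String.ofList_toList]
  | none =>
    -- A found nothing: no known index starts u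
    have hno : ∀ x ∈ pvKnownIndices, ¬ PySem.Str.startswith u x = true := by
      intro x hx
      exact List.find?_eq_none.mp hfa x (pvPerm.mem_iff.mpr hx)
    have hBnone : (PySem.List.pyRange (N : Int) 0 (-1)).find?
        (fun j => PySem.Set.contains pvKnownSet (PySem.Str.slice u none (some j))) = none := by
      apply pvDescNone
      intro j h1 h2
      have hne : PySem.Set.contains pvKnownSet
          (PySem.Str.slice u none (some (j : Int))) = false := by
        rw [Bool.eq_false_iff]
        intro hck
        rcases (pvTakeKnown_iff u j (by omega)).mp ((hpredB j).mp hck) with ⟨x, hx, hpx, _⟩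
        exact hno x hx hpx
      exact hne
    simp only [hBnone]
    -- both fall back; B's next(…) equals the length of A's accumulated prefix
    have hnext := pvNext_eq u.toList 0
    simp only [zero_add] at hnext
    simp only [PySem.Str.len_eq, String.toList_ofList]
    simp only [hnext]
    set P := pvPrefixCharsA u.toList with hP
    have hPpre : P <+: u.toList := pvPrefixChars_prefix u.toList
    have hPtake : u.toList.take P.length = P := (List.prefix_iff_eq_take.mp hPpre).symm
    by_cases h4 : 4 ≤ P.length
    · have halpha : PySem.Str.strIsalpha (String.ofList P) = true := by
        simp only [PySem.Str.strIsalpha_eq, String.toList_ofList]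
        simp only [PySem.Chars.strIsalpha, Bool.and_eq_true, Bool.not_eq_eq_eq_not,
          Bool.not_true, List.isEmpty_eq_false_iff, ne_eq, List.all_eq_true]
        exact ⟨by intro hnil; rw [hnil] at h4; simp at h4,
          fun c hc => pvPrefixChars_alpha u.toList c hc⟩
      rw [if_pos ⟨by exact_mod_cast h4, halpha⟩, if_pos (by exact_mod_cast h4)]
      rw [pvSlice_take, hPtake]
    · rw [if_neg (fun hcon => h4 (by exact_mod_cast hcon.1)), if_neg (by omega)]
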